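-- pv_equiv track=rewrite | github.com/alw017/CSE-105-Project | Mapping Reduction Problem/main.py | getTMCharacteristics
-- ===== SOURCE A (Python) =====
-- def getTMCharacteristics(tokens):
--     state = 1
--     oldStates = ""
--     oldAlphabet = ""
--     oldTapeAlphabet = ""
--     oldTransitions = ""
--     oldStart = ""
--     oldAccept = ""
--     oldReject = ""
--     inputString = ""
--     for token in tokens:
--         if (token == "END_SECTION"):
--             state = state + 1
--             continue
--         else:
--             match state:
--                 case 1:
--                     oldStates = oldStates + token + ";"
--                 case 2:
--                     if not oldAlphabet:
--                         oldAlphabet = token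
--                     else:
--                         raise Exception("multiple alphabets defined in input turing machine")
--                 case 3:
--                     if not oldTapeAlphabet:
--                         oldTapeAlphabet = token
--                     else:
--                         raise Exception("multiple tape alphabets defined in input turing machine")
--                 case 4:
--                     oldTransitions = oldTransitions + token + ";"
--                 case 5:
--                     if not oldStart:
--                         oldStart = token
--                     else:
--                         raise Exception("multiple start states defined in input turing machine")
--                 case 6:
--                     if not oldAccept:
--                         oldAccept = token
--                     else:
--                         raise Exception("multiple accept states defined in input turing machine")
--                 case 7:
--                     if not oldReject:
--                         oldReject = token
--                     else:
--                         raise Exception("multiple reject states defined in input turing machine")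
--                 case 8:
--                     inputString = token
--     return (oldStates, oldAlphabet, oldTapeAlphabet, oldTransitions, oldStart, oldAccept, oldReject, inputString)
-- ===== SOURCE B (Python) =====
-- def getTMCharacteristics(tokens):
--     # Split into sections at END_SECTION boundaries, then project the 8 fields.
--     sections, cur = [], []
--     for t in tokens:
--         if t == "END_SECTION":
--             sections.append(cur)
--             cur = []
--         else:
--             cur.append(t)
--     sections.append(cur)
--
--     def sec(i):
--         return sections[i] if i < len(sections) else []
--
--     def joined(xs):
--         return "".join(t + ";" for t in xs)
--
--     def last(xs):
--         return xs[-1] if xs else ""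
--
--     return (joined(sec(0)), last(sec(1)), last(sec(2)), joined(sec(3)),
--             last(sec(4)), last(sec(5)), last(sec(6)), last(sec(7)))
-- ===== Notes on version B (the rewrite author's own statement) =====
-- stated objective: simpler
-- what changed: A threads a 9-state counter with eight mutable accumulators through one loop; B first splits the token list into sections at END_SECTION boundaries and then projects each of the eight fields from its section (join with ';' for states/transitions, last token for the single-valued fields).
import Mathlib
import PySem

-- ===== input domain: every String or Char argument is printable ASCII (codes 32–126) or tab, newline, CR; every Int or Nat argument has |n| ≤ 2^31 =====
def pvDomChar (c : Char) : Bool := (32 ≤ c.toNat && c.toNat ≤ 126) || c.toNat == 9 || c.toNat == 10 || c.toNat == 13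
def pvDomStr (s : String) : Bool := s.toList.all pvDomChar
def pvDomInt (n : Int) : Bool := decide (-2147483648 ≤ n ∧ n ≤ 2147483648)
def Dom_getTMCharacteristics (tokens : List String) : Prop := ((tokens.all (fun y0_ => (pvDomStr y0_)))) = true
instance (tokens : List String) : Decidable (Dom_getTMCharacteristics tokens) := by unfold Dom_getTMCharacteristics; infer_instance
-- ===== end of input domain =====

-- B replaces A's 9-state accumulator loop by splitting the token list into sections at
-- END_SECTION boundaries and projecting the eight fields from the sections (objective: simpler).

-- ===== PORT A =====
-- A's loop, one parameter per Python local; `none` models the Python Exception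
-- ("multiple … defined in input turing machine"); Pre_ excludes exactly those inputs.
def getTMCharacteristicsAux : List String → Int → String → String → String → String → String → String → String → String → Option (String × String × String × String × String × String × String × String)
  | [], _st, s1, s2, s3, s4, s5, s6, s7, s8 => some (s1, s2, s3, s4, s5, s6, s7, s8)
  | token :: rest, st, s1, s2, s3, s4, s5, s6, s7, s8 =>
    if token = "END_SECTION" then
      getTMCharacteristicsAux rest (st + 1) s1 s2 s3 s4 s5 s6 s7 s8
    else if st = 1 then getTMCharacteristicsAux rest st (s1 ++ token ++ ";") s2 s3 s4 s5 s6 s7 s8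
    else if st = 2 then
      if s2 = "" then getTMCharacteristicsAux rest st s1 token s3 s4 s5 s6 s7 s8 else none
    else if st = 3 then
      if s3 = "" then getTMCharacteristicsAux rest st s1 s2 token s4 s5 s6 s7 s8 else none
    else if st = 4 then getTMCharacteristicsAux rest st s1 s2 s3 (s4 ++ token ++ ";") s5 s6 s7 s8
    else if st = 5 then
      if s5 = "" then getTMCharacteristicsAux rest st s1 s2 s3 s4 token s6 s7 s8 else none
    else if st = 6 then
      if s6 = "" then getTMCharacteristicsAux rest st s1 s2 s3 s4 s5 token s7 s8 else none
    else if st = 7 then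
      if s7 = "" then getTMCharacteristicsAux rest st s1 s2 s3 s4 s5 s6 token s8 else none
    else if st = 8 then getTMCharacteristicsAux rest st s1 s2 s3 s4 s5 s6 s7 token
    else getTMCharacteristicsAux rest st s1 s2 s3 s4 s5 s6 s7 s8  -- match falls through: token ignored

def getTMCharacteristics (tokens : List String) : String × String × String × String × String × String × String × String :=
  -- the default is never the claimed value: Pre_ excludes the inputs on which the Python raises
  (getTMCharacteristicsAux tokens 1 "" "" "" "" "" "" "" "").getD ("", "", "", "", "", "", "", "")

-- ===== PORT B =====
-- the accumulating section-splitting loop of Source B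
def pvSections (tokens : List String) : List (List String) :=
  let p := tokens.foldl
    (fun (acc : List (List String) × List String) t =>
      if t = "END_SECTION" then (acc.1 ++ [acc.2], ([] : List String)) else (acc.1, acc.2 ++ [t]))
    ([], [])
  p.1 ++ [p.2]

-- sections[i] if i < len(sections) else []
def pvSec (secs : List (List String)) (i : Nat) : List String := secs.getD i []

-- "".join(t + ";" for t in xs)
def pvJoinSemi : List String → String
  | [] => ""
  | t :: ts => t ++ ";" ++ pvJoinSemi ts

-- xs[-1] if xs else ""
def pvLast (xs : List String) : String := xs.getLastD ""

def getTMCharacteristics_alt (tokens : List String) : String × String × String × String × String × String × String × String :=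
  let secs := pvSections tokens
  (pvJoinSemi (pvSec secs 0), pvLast (pvSec secs 1), pvLast (pvSec secs 2), pvJoinSemi (pvSec secs 3),
   pvLast (pvSec secs 4), pvLast (pvSec secs 5), pvLast (pvSec secs 6), pvLast (pvSec secs 7))

-- ===== PRECONDITION & SPEC =====
-- A raises Exception("multiple … defined …") exactly when one of the single-valued sections
-- (the 2nd, 3rd, 5th, 6th, 7th of the END_SECTION-split, indices 1,2,4,5,6) contains a
-- non-empty token followed by another token; Pre_ excludes exactly those inputs.
def Pre_getTMCharacteristics (tokens : List String) : Prop :=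
  ∀ k ∈ ([1, 2, 4, 5, 6] : List Nat),
    ∀ t ∈ ((tokens.splitOn "END_SECTION").getD k []).dropLast, t = ""
instance (tokens : List String) : Decidable (Pre_getTMCharacteristics tokens) := by
  unfold Pre_getTMCharacteristics; infer_instance

def pvWitness_getTMCharacteristics : List String :=
  ["q0", "q1", "END_SECTION", "a", "END_SECTION", "g", "END_SECTION", "t1", "t2",
   "END_SECTION", "s", "END_SECTION", "qa", "END_SECTION", "qr", "END_SECTION", "w"]

def Spec_getTMCharacteristics (tokens : List String) (out : String × String × String × String × String × String × String × String) : Prop := out = getTMCharacteristics_alt tokens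
instance (tokens : List String) (out : String × String × String × String × String × String × String × String) : Decidable (Spec_getTMCharacteristics tokens out) := by
  unfold Spec_getTMCharacteristics
  letI d2 : DecidableEq (String × String) := instDecidableEqProd
  letI d3 : DecidableEq (String × String × String) := instDecidableEqProd
  letI d4 : DecidableEq (String × String × String × String) := instDecidableEqProd
  letI d5 : DecidableEq (String × String × String × String × String) := instDecidableEqProd
  letI d6 : DecidableEq (String × String × String × String × String × String) := instDecidableEqProd
  letI d7 : DecidableEq (String × String × String × String × String × String × String) := instDecidableEqProd
  letI d8 : DecidableEq (String × String × String × String × String × String × String × String) := instDecidableEqProd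
  exact d8 out (getTMCharacteristics_alt tokens)

-- ===== CLAIM (what is proved, stated in full; the proofs are below) =====
def Claim_equal_getTMCharacteristics : Prop := ∀ (tokens : List String), Dom_getTMCharacteristics tokens → Pre_getTMCharacteristics tokens → Spec_getTMCharacteristics tokens (getTMCharacteristics tokens)

-- ===== LEMMAS AND PROOFS =====

lemma splitOn_cons_self (ts : List String) :
    ("END_SECTION" :: ts).splitOn "END_SECTION" = [] :: ts.splitOn "END_SECTION" := by
  simp [List.splitOn]

-- Equality of the 8-string result tuple, registered under a Spec_-shaped name (reducible, so it
-- keys on Eq): the default instance search exceeds synthInstance.maxSize on an 8-fold product,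
-- and the behavioural harness has to decide such equalities.
@[reducible] def Spec_pvTuple8Eq (a b : String × String × String × String × String × String × String × String) : Prop := a = b
instance (a b : String × String × String × String × String × String × String × String) : Decidable (Spec_pvTuple8Eq a b) :=
  let d2 : DecidableEq (String × String) := instDecidableEqProd
  let d3 : DecidableEq (String × String × String) := @instDecidableEqProd _ _ inferInstance d2
  let d4 : DecidableEq (String × String × String × String) := @instDecidableEqProd _ _ inferInstance d3
  let d5 : DecidableEq (String × String × String × String × String) := @instDecidableEqProd _ _ inferInstance d4
  let d6 : DecidableEq (String × String × String × String × String × String) := @instDecidableEqProd _ _ inferInstance d5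
  let d7 : DecidableEq (String × String × String × String × String × String × String) := @instDecidableEqProd _ _ inferInstance d6
  @instDecidableEqProd _ _ inferInstance d7 a b


-- the section that the field of Python-state `k` still draws from, when the loop is in state `st`
def secFrom (st : Int) (k : Nat) (secs : List (List String)) : List String :=
  if st ≤ (k : Int) then secs.getD ((k : Int) - st).toNat [] else []

-- closed form of A's returned tuple from state `st`, the accumulators, and the remaining sections
def Fchar (st : Int) (s1 s2 s3 s4 s5 s6 s7 s8 : String) (secs : List (List String)) :
    String × String × String × String × String × String × String × String :=
  (s1 ++ pvJoinSemi (secFrom st 1 secs),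
   (secFrom st 2 secs).getLastD s2,
   (secFrom st 3 secs).getLastD s3,
   s4 ++ pvJoinSemi (secFrom st 4 secs),
   (secFrom st 5 secs).getLastD s5,
   (secFrom st 6 secs).getLastD s6,
   (secFrom st 7 secs).getLastD s7,
   (secFrom st 8 secs).getLastD s8)

lemma splitOn_cons_ne (t : String) (ts : List String) (ht : t ≠ "END_SECTION") :
    (t :: ts).splitOn "END_SECTION" = (ts.splitOn "END_SECTION").modifyHead (List.cons t) := by
  simp [List.splitOn, List.splitOnP_cons, ht]

lemma splitOn_ne_nil (ts : List String) : ts.splitOn "END_SECTION" ≠ [] :=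
  List.splitOnP_ne_nil _ ts

lemma secFrom_cons_nil (st : Int) (k : Nat) (secs : List (List String)) :
    secFrom st k ([] :: secs) = secFrom (st + 1) k secs := by
  unfold secFrom
  split_ifs with h1 h2
  · have : ((k : Int) - st).toNat = ((k : Int) - (st + 1)).toNat + 1 := by omega
    rw [this]; rfl
  · have : ((k : Int) - st).toNat = 0 := by omega
    rw [this]; rfl
  · omega
  · rfl

lemma secFrom_cons_cons_eq (st : Int) (k : Nat) (t : String) (h : List String)
    (tl : List (List String)) (hk : (k : Int) = st) :
    secFrom st k ((t :: h) :: tl) = t :: secFrom st k (h :: tl) := by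
  unfold secFrom
  have h1 : st ≤ (k : Int) := by omega
  have h0 : ((k : Int) - st).toNat = 0 := by omega
  rw [if_pos h1, if_pos h1, h0]; rfl

lemma secFrom_cons_cons_ne (st : Int) (k : Nat) (t : String) (h : List String)
    (tl : List (List String)) (hk : ¬ (k : Int) = st) :
    secFrom st k ((t :: h) :: tl) = secFrom st k (h :: tl) := by
  unfold secFrom
  split_ifs with h1
  · obtain ⟨n, hn⟩ : ∃ n : Nat, ((k : Int) - st).toNat = n + 1 :=
      ⟨((k : Int) - st).toNat - 1, by omega⟩
    rw [hn]; rfl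
  · rfl

lemma secFrom_single_nil (st : Int) (k : Nat) : secFrom st k [[]] = [] := by
  unfold secFrom
  split_ifs with h1
  · cases ((k : Int) - st).toNat <;> rfl
  · rfl

lemma secFrom_self (st : Int) (k : Nat) (h : List String) (tl : List (List String))
    (hk : (k : Int) = st) : secFrom st k (h :: tl) = h := by
  unfold secFrom
  have h0 : ((k : Int) - st).toNat = 0 := by omega
  rw [if_pos (by omega), h0]; rfl

-- loop invariant for the no-raise argument: the field of single-valued state `k` (value `v`)
-- will not be overwritten while processing the remaining sections
def OkSec (st : Int) (k : Nat) (v : String) (secs : List (List String)) : Prop :=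
  (st ≤ (k : Int) → v ≠ "" → secFrom st k secs = []) ∧
  ∀ t ∈ (secFrom st k secs).dropLast, t = ""

lemma okSec_end {st : Int} {k : Nat} {v : String} {secs : List (List String)}
    (ok : OkSec st k v ([] :: secs)) : OkSec (st + 1) k v secs := by
  obtain ⟨o1, o2⟩ := ok
  constructor
  · intro hle hv
    have := o1 (by omega) hv
    rwa [secFrom_cons_nil] at this
  · intro t htm
    exact o2 t (by rwa [secFrom_cons_nil])

lemma okSec_tail {st : Int} {k : Nat} {v t : String} {h : List String} {tl : List (List String)}
    (hk : ¬ (k : Int) = st) (ok : OkSec st k v ((t :: h) :: tl)) : OkSec st k v (h :: tl) := by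
  rw [OkSec, secFrom_cons_cons_ne st k t h tl hk] at ok
  exact ok

lemma okSec_assign {st : Int} {k : Nat} {t : String} {h : List String} {tl : List (List String)}
    (hk : (k : Int) = st) (ok : OkSec st k "" ((t :: h) :: tl)) : OkSec st k t (h :: tl) := by
  obtain ⟨_, o2⟩ := ok
  rw [secFrom_cons_cons_eq st k t h tl hk, secFrom_self st k h tl hk] at o2
  rw [OkSec, secFrom_self st k h tl hk]
  cases h with
  | nil => exact ⟨fun _ _ => rfl, by simp⟩
  | cons a as =>
    constructor
    · intro _ htne
      exact absurd (o2 t (by rw [List.dropLast_cons₂]; exact List.mem_cons_self ..)) htne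
    · intro x hx
      exact o2 x (by rw [List.dropLast_cons₂]; exact List.mem_cons_of_mem _ hx)


lemma aux_some (ts : List String) : ∀ (st : Int) (s1 s2 s3 s4 s5 s6 s7 s8 : String)
    (r : String × String × String × String × String × String × String × String),
    getTMCharacteristicsAux ts st s1 s2 s3 s4 s5 s6 s7 s8 = some r →
    r = Fchar st s1 s2 s3 s4 s5 s6 s7 s8 (ts.splitOn "END_SECTION") := by
  induction ts with
  | nil =>
    intro st s1 s2 s3 s4 s5 s6 s7 s8 r hr
    simp only [getTMCharacteristicsAux, Option.some.injEq] at hr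
    subst hr
    simp [Fchar, List.splitOn, secFrom_single_nil, pvJoinSemi, String.append_empty]
  | cons t rest IH =>
    intro st s1 s2 s3 s4 s5 s6 s7 s8 r hr
    by_cases ht : t = "END_SECTION"
    · subst ht
      rw [getTMCharacteristicsAux, if_pos rfl] at hr
      rw [IH _ _ _ _ _ _ _ _ _ _ hr, splitOn_cons_self]
      simp [Fchar, secFrom_cons_nil]
    · obtain ⟨h, tl, hsp⟩ := List.exists_cons_of_ne_nil (splitOn_ne_nil rest)
      have hsp' : (t :: rest).splitOn "END_SECTION" = (t :: h) :: tl := by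
        rw [splitOn_cons_ne t rest ht, hsp]; rfl
      rw [getTMCharacteristicsAux, if_neg ht] at hr
      rw [hsp']
      by_cases h1 : st = 1
      · subst h1
        rw [if_pos rfl] at hr
        rw [IH _ _ _ _ _ _ _ _ _ _ hr, hsp]
        simp only [Fchar, secFrom_cons_cons_eq _ _ _ _ _ (by norm_num : ((1:Nat):Int) = 1),
          secFrom_cons_cons_ne _ _ _ _ _ (by norm_num : ¬((2:Nat):Int) = 1),
          secFrom_cons_cons_ne _ _ _ _ _ (by norm_num : ¬((3:Nat):Int) = 1),
          secFrom_cons_cons_ne _ _ _ _ _ (by norm_num : ¬((4:Nat):Int) = 1),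
          secFrom_cons_cons_ne _ _ _ _ _ (by norm_num : ¬((5:Nat):Int) = 1),
          secFrom_cons_cons_ne _ _ _ _ _ (by norm_num : ¬((6:Nat):Int) = 1),
          secFrom_cons_cons_ne _ _ _ _ _ (by norm_num : ¬((7:Nat):Int) = 1),
          secFrom_cons_cons_ne _ _ _ _ _ (by norm_num : ¬((8:Nat):Int) = 1),
          pvJoinSemi, String.append_assoc]
      rw [if_neg h1] at hr
      by_cases h2 : st = 2
      · subst h2
        rw [if_pos rfl] at hr
        by_cases hv2 : s2 = ""
        · subst hv2
          rw [if_pos rfl] at hr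
          rw [IH _ _ _ _ _ _ _ _ _ _ hr, hsp]
          simp only [Fchar, secFrom_cons_cons_eq _ _ _ _ _ (by norm_num : ((2:Nat):Int) = 2),
          secFrom_cons_cons_ne _ _ _ _ _ (by norm_num : ¬((1:Nat):Int) = 2),
          secFrom_cons_cons_ne _ _ _ _ _ (by norm_num : ¬((3:Nat):Int) = 2),
          secFrom_cons_cons_ne _ _ _ _ _ (by norm_num : ¬((4:Nat):Int) = 2),
          secFrom_cons_cons_ne _ _ _ _ _ (by norm_num : ¬((5:Nat):Int) = 2),
          secFrom_cons_cons_ne _ _ _ _ _ (by norm_num : ¬((6:Nat):Int) = 2),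
          secFrom_cons_cons_ne _ _ _ _ _ (by norm_num : ¬((7:Nat):Int) = 2),
          secFrom_cons_cons_ne _ _ _ _ _ (by norm_num : ¬((8:Nat):Int) = 2),
          List.getLastD_cons]
        · rw [if_neg hv2] at hr
          exact absurd hr (by simp)
      rw [if_neg h2] at hr
      by_cases h3 : st = 3
      · subst h3
        rw [if_pos rfl] at hr
        by_cases hv3 : s3 = ""
        · subst hv3
          rw [if_pos rfl] at hr
          rw [IH _ _ _ _ _ _ _ _ _ _ hr, hsp]
          simp only [Fchar, secFrom_cons_cons_eq _ _ _ _ _ (by norm_num : ((3:Nat):Int) = 3),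
          secFrom_cons_cons_ne _ _ _ _ _ (by norm_num : ¬((1:Nat):Int) = 3),
          secFrom_cons_cons_ne _ _ _ _ _ (by norm_num : ¬((2:Nat):Int) = 3),
          secFrom_cons_cons_ne _ _ _ _ _ (by norm_num : ¬((4:Nat):Int) = 3),
          secFrom_cons_cons_ne _ _ _ _ _ (by norm_num : ¬((5:Nat):Int) = 3),
          secFrom_cons_cons_ne _ _ _ _ _ (by norm_num : ¬((6:Nat):Int) = 3),
          secFrom_cons_cons_ne _ _ _ _ _ (by norm_num : ¬((7:Nat):Int) = 3),
          secFrom_cons_cons_ne _ _ _ _ _ (by norm_num : ¬((8:Nat):Int) = 3),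
          List.getLastD_cons]
        · rw [if_neg hv3] at hr
          exact absurd hr (by simp)
      rw [if_neg h3] at hr
      by_cases h4 : st = 4
      · subst h4
        rw [if_pos rfl] at hr
        rw [IH _ _ _ _ _ _ _ _ _ _ hr, hsp]
        simp only [Fchar, secFrom_cons_cons_eq _ _ _ _ _ (by norm_num : ((4:Nat):Int) = 4),
          secFrom_cons_cons_ne _ _ _ _ _ (by norm_num : ¬((1:Nat):Int) = 4),
          secFrom_cons_cons_ne _ _ _ _ _ (by norm_num : ¬((2:Nat):Int) = 4),
          secFrom_cons_cons_ne _ _ _ _ _ (by norm_num : ¬((3:Nat):Int) = 4),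
          secFrom_cons_cons_ne _ _ _ _ _ (by norm_num : ¬((5:Nat):Int) = 4),
          secFrom_cons_cons_ne _ _ _ _ _ (by norm_num : ¬((6:Nat):Int) = 4),
          secFrom_cons_cons_ne _ _ _ _ _ (by norm_num : ¬((7:Nat):Int) = 4),
          secFrom_cons_cons_ne _ _ _ _ _ (by norm_num : ¬((8:Nat):Int) = 4),
          pvJoinSemi, String.append_assoc]
      rw [if_neg h4] at hr
      by_cases h5 : st = 5
      · subst h5
        rw [if_pos rfl] at hr
        by_cases hv5 : s5 = ""
        · subst hv5
          rw [if_pos rfl] at hr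
          rw [IH _ _ _ _ _ _ _ _ _ _ hr, hsp]
          simp only [Fchar, secFrom_cons_cons_eq _ _ _ _ _ (by norm_num : ((5:Nat):Int) = 5),
          secFrom_cons_cons_ne _ _ _ _ _ (by norm_num : ¬((1:Nat):Int) = 5),
          secFrom_cons_cons_ne _ _ _ _ _ (by norm_num : ¬((2:Nat):Int) = 5),
          secFrom_cons_cons_ne _ _ _ _ _ (by norm_num : ¬((3:Nat):Int) = 5),
          secFrom_cons_cons_ne _ _ _ _ _ (by norm_num : ¬((4:Nat):Int) = 5),
          secFrom_cons_cons_ne _ _ _ _ _ (by norm_num : ¬((6:Nat):Int) = 5),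
          secFrom_cons_cons_ne _ _ _ _ _ (by norm_num : ¬((7:Nat):Int) = 5),
          secFrom_cons_cons_ne _ _ _ _ _ (by norm_num : ¬((8:Nat):Int) = 5),
          List.getLastD_cons]
        · rw [if_neg hv5] at hr
          exact absurd hr (by simp)
      rw [if_neg h5] at hr
      by_cases h6 : st = 6
      · subst h6
        rw [if_pos rfl] at hr
        by_cases hv6 : s6 = ""
        · subst hv6
          rw [if_pos rfl] at hr
          rw [IH _ _ _ _ _ _ _ _ _ _ hr, hsp]
          simp only [Fchar, secFrom_cons_cons_eq _ _ _ _ _ (by norm_num : ((6:Nat):Int) = 6),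
          secFrom_cons_cons_ne _ _ _ _ _ (by norm_num : ¬((1:Nat):Int) = 6),
          secFrom_cons_cons_ne _ _ _ _ _ (by norm_num : ¬((2:Nat):Int) = 6),
          secFrom_cons_cons_ne _ _ _ _ _ (by norm_num : ¬((3:Nat):Int) = 6),
          secFrom_cons_cons_ne _ _ _ _ _ (by norm_num : ¬((4:Nat):Int) = 6),
          secFrom_cons_cons_ne _ _ _ _ _ (by norm_num : ¬((5:Nat):Int) = 6),
          secFrom_cons_cons_ne _ _ _ _ _ (by norm_num : ¬((7:Nat):Int) = 6),
          secFrom_cons_cons_ne _ _ _ _ _ (by norm_num : ¬((8:Nat):Int) = 6),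
          List.getLastD_cons]
        · rw [if_neg hv6] at hr
          exact absurd hr (by simp)
      rw [if_neg h6] at hr
      by_cases h7 : st = 7
      · subst h7
        rw [if_pos rfl] at hr
        by_cases hv7 : s7 = ""
        · subst hv7
          rw [if_pos rfl] at hr
          rw [IH _ _ _ _ _ _ _ _ _ _ hr, hsp]
          simp only [Fchar, secFrom_cons_cons_eq _ _ _ _ _ (by norm_num : ((7:Nat):Int) = 7),
          secFrom_cons_cons_ne _ _ _ _ _ (by norm_num : ¬((1:Nat):Int) = 7),
          secFrom_cons_cons_ne _ _ _ _ _ (by norm_num : ¬((2:Nat):Int) = 7),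
          secFrom_cons_cons_ne _ _ _ _ _ (by norm_num : ¬((3:Nat):Int) = 7),
          secFrom_cons_cons_ne _ _ _ _ _ (by norm_num : ¬((4:Nat):Int) = 7),
          secFrom_cons_cons_ne _ _ _ _ _ (by norm_num : ¬((5:Nat):Int) = 7),
          secFrom_cons_cons_ne _ _ _ _ _ (by norm_num : ¬((6:Nat):Int) = 7),
          secFrom_cons_cons_ne _ _ _ _ _ (by norm_num : ¬((8:Nat):Int) = 7),
          List.getLastD_cons]
        · rw [if_neg hv7] at hr
          exact absurd hr (by simp)
      rw [if_neg h7] at hr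
      by_cases h8 : st = 8
      · subst h8
        rw [if_pos rfl] at hr
        rw [IH _ _ _ _ _ _ _ _ _ _ hr, hsp]
        simp only [Fchar, secFrom_cons_cons_eq _ _ _ _ _ (by norm_num : ((8:Nat):Int) = 8),
          secFrom_cons_cons_ne _ _ _ _ _ (by norm_num : ¬((1:Nat):Int) = 8),
          secFrom_cons_cons_ne _ _ _ _ _ (by norm_num : ¬((2:Nat):Int) = 8),
          secFrom_cons_cons_ne _ _ _ _ _ (by norm_num : ¬((3:Nat):Int) = 8),
          secFrom_cons_cons_ne _ _ _ _ _ (by norm_num : ¬((4:Nat):Int) = 8),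
          secFrom_cons_cons_ne _ _ _ _ _ (by norm_num : ¬((5:Nat):Int) = 8),
          secFrom_cons_cons_ne _ _ _ _ _ (by norm_num : ¬((6:Nat):Int) = 8),
          secFrom_cons_cons_ne _ _ _ _ _ (by norm_num : ¬((7:Nat):Int) = 8),
          List.getLastD_cons]
      rw [if_neg h8] at hr
      rw [IH _ _ _ _ _ _ _ _ _ _ hr, hsp]
      simp only [Fchar, secFrom_cons_cons_ne _ _ _ _ _ (by omega : ¬((1:Nat):Int) = st),
        secFrom_cons_cons_ne _ _ _ _ _ (by omega : ¬((2:Nat):Int) = st),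
        secFrom_cons_cons_ne _ _ _ _ _ (by omega : ¬((3:Nat):Int) = st),
        secFrom_cons_cons_ne _ _ _ _ _ (by omega : ¬((4:Nat):Int) = st),
        secFrom_cons_cons_ne _ _ _ _ _ (by omega : ¬((5:Nat):Int) = st),
        secFrom_cons_cons_ne _ _ _ _ _ (by omega : ¬((6:Nat):Int) = st),
        secFrom_cons_cons_ne _ _ _ _ _ (by omega : ¬((7:Nat):Int) = st),
        secFrom_cons_cons_ne _ _ _ _ _ (by omega : ¬((8:Nat):Int) = st)]

lemma aux_isSome (ts : List String) : ∀ (st : Int) (s1 s2 s3 s4 s5 s6 s7 s8 : String),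
    OkSec st 2 s2 (ts.splitOn "END_SECTION") →
    OkSec st 3 s3 (ts.splitOn "END_SECTION") →
    OkSec st 5 s5 (ts.splitOn "END_SECTION") →
    OkSec st 6 s6 (ts.splitOn "END_SECTION") →
    OkSec st 7 s7 (ts.splitOn "END_SECTION") →
    (getTMCharacteristicsAux ts st s1 s2 s3 s4 s5 s6 s7 s8).isSome := by
  induction ts with
  | nil => intros; simp [getTMCharacteristicsAux]
  | cons t rest IH =>
    intro st s1 s2 s3 s4 s5 s6 s7 s8 ok2 ok3 ok5 ok6 ok7
    by_cases ht : t = "END_SECTION"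
    · subst ht
      rw [splitOn_cons_self] at ok2 ok3 ok5 ok6 ok7
      rw [getTMCharacteristicsAux, if_pos rfl]
      exact IH _ _ _ _ _ _ _ _ _ (okSec_end ok2) (okSec_end ok3) (okSec_end ok5) (okSec_end ok6) (okSec_end ok7)
    · obtain ⟨h, tl, hsp⟩ := List.exists_cons_of_ne_nil (splitOn_ne_nil rest)
      have hsp' : (t :: rest).splitOn "END_SECTION" = (t :: h) :: tl := by
        rw [splitOn_cons_ne t rest ht, hsp]; rfl
      rw [hsp'] at ok2 ok3 ok5 ok6 ok7
      rw [getTMCharacteristicsAux, if_neg ht]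
      by_cases h1 : st = 1
      · subst h1
        rw [if_pos rfl]
        refine IH _ _ _ _ _ _ _ _ _ ?_ ?_ ?_ ?_ ?_ <;> rw [hsp]
        · exact okSec_tail (by norm_num) ok2
        · exact okSec_tail (by norm_num) ok3
        · exact okSec_tail (by norm_num) ok5
        · exact okSec_tail (by norm_num) ok6
        · exact okSec_tail (by norm_num) ok7
      rw [if_neg h1]
      by_cases h2 : st = 2
      · subst h2
        rw [if_pos rfl]
        by_cases hv2 : s2 = ""
        · subst hv2
          rw [if_pos rfl]
          refine IH _ _ _ _ _ _ _ _ _ ?_ ?_ ?_ ?_ ?_ <;> rw [hsp]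
          · exact okSec_assign (by norm_num) ok2
          · exact okSec_tail (by norm_num) ok3
          · exact okSec_tail (by norm_num) ok5
          · exact okSec_tail (by norm_num) ok6
          · exact okSec_tail (by norm_num) ok7
        · have := ok2.1 (by norm_num) hv2
          rw [secFrom_cons_cons_eq _ _ _ _ _ (by norm_num : ((2:Nat):Int) = 2)] at this
          simp at this
      rw [if_neg h2]
      by_cases h3 : st = 3
      · subst h3
        rw [if_pos rfl]
        by_cases hv3 : s3 = ""
        · subst hv3
          rw [if_pos rfl]
          refine IH _ _ _ _ _ _ _ _ _ ?_ ?_ ?_ ?_ ?_ <;> rw [hsp]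
          · exact okSec_tail (by norm_num) ok2
          · exact okSec_assign (by norm_num) ok3
          · exact okSec_tail (by norm_num) ok5
          · exact okSec_tail (by norm_num) ok6
          · exact okSec_tail (by norm_num) ok7
        · have := ok3.1 (by norm_num) hv3
          rw [secFrom_cons_cons_eq _ _ _ _ _ (by norm_num : ((3:Nat):Int) = 3)] at this
          simp at this
      rw [if_neg h3]
      by_cases h4 : st = 4
      · subst h4
        rw [if_pos rfl]
        refine IH _ _ _ _ _ _ _ _ _ ?_ ?_ ?_ ?_ ?_ <;> rw [hsp]
        · exact okSec_tail (by norm_num) ok2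
        · exact okSec_tail (by norm_num) ok3
        · exact okSec_tail (by norm_num) ok5
        · exact okSec_tail (by norm_num) ok6
        · exact okSec_tail (by norm_num) ok7
      rw [if_neg h4]
      by_cases h5 : st = 5
      · subst h5
        rw [if_pos rfl]
        by_cases hv5 : s5 = ""
        · subst hv5
          rw [if_pos rfl]
          refine IH _ _ _ _ _ _ _ _ _ ?_ ?_ ?_ ?_ ?_ <;> rw [hsp]
          · exact okSec_tail (by norm_num) ok2
          · exact okSec_tail (by norm_num) ok3
          · exact okSec_assign (by norm_num) ok5
          · exact okSec_tail (by norm_num) ok6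
          · exact okSec_tail (by norm_num) ok7
        · have := ok5.1 (by norm_num) hv5
          rw [secFrom_cons_cons_eq _ _ _ _ _ (by norm_num : ((5:Nat):Int) = 5)] at this
          simp at this
      rw [if_neg h5]
      by_cases h6 : st = 6
      · subst h6
        rw [if_pos rfl]
        by_cases hv6 : s6 = ""
        · subst hv6
          rw [if_pos rfl]
          refine IH _ _ _ _ _ _ _ _ _ ?_ ?_ ?_ ?_ ?_ <;> rw [hsp]
          · exact okSec_tail (by norm_num) ok2
          · exact okSec_tail (by norm_num) ok3
          · exact okSec_tail (by norm_num) ok5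
          · exact okSec_assign (by norm_num) ok6
          · exact okSec_tail (by norm_num) ok7
        · have := ok6.1 (by norm_num) hv6
          rw [secFrom_cons_cons_eq _ _ _ _ _ (by norm_num : ((6:Nat):Int) = 6)] at this
          simp at this
      rw [if_neg h6]
      by_cases h7 : st = 7
      · subst h7
        rw [if_pos rfl]
        by_cases hv7 : s7 = ""
        · subst hv7
          rw [if_pos rfl]
          refine IH _ _ _ _ _ _ _ _ _ ?_ ?_ ?_ ?_ ?_ <;> rw [hsp]
          · exact okSec_tail (by norm_num) ok2
          · exact okSec_tail (by norm_num) ok3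
          · exact okSec_tail (by norm_num) ok5
          · exact okSec_tail (by norm_num) ok6
          · exact okSec_assign (by norm_num) ok7
        · have := ok7.1 (by norm_num) hv7
          rw [secFrom_cons_cons_eq _ _ _ _ _ (by norm_num : ((7:Nat):Int) = 7)] at this
          simp at this
      rw [if_neg h7]
      by_cases h8 : st = 8
      · subst h8
        rw [if_pos rfl]
        refine IH _ _ _ _ _ _ _ _ _ ?_ ?_ ?_ ?_ ?_ <;> rw [hsp]
        · exact okSec_tail (by norm_num) ok2
        · exact okSec_tail (by norm_num) ok3
        · exact okSec_tail (by norm_num) ok5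
        · exact okSec_tail (by norm_num) ok6
        · exact okSec_tail (by norm_num) ok7
      rw [if_neg h8]
      refine IH _ _ _ _ _ _ _ _ _ ?_ ?_ ?_ ?_ ?_ <;> rw [hsp]
      · exact okSec_tail (by omega) ok2
      · exact okSec_tail (by omega) ok3
      · exact okSec_tail (by omega) ok5
      · exact okSec_tail (by omega) ok6
      · exact okSec_tail (by omega) ok7


-- B's splitting loop computes List.splitOn
lemma pvSections_go (ts : List String) : ∀ (out : List (List String)) (cur : List String),
    (ts.foldl (fun (acc : List (List String) × List String) t =>
        if t = "END_SECTION" then (acc.1 ++ [acc.2], ([] : List String)) else (acc.1, acc.2 ++ [t]))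
      (out, cur)).1 ++
    [(ts.foldl (fun (acc : List (List String) × List String) t =>
        if t = "END_SECTION" then (acc.1 ++ [acc.2], ([] : List String)) else (acc.1, acc.2 ++ [t]))
      (out, cur)).2] =
    out ++ (ts.splitOn "END_SECTION").modifyHead (fun s => cur ++ s) := by
  induction ts with
  | nil => intro out cur; simp [List.splitOn]
  | cons t rest IH =>
    intro out cur
    obtain ⟨h, tl, hsp⟩ := List.exists_cons_of_ne_nil (splitOn_ne_nil rest)
    by_cases ht : t = "END_SECTION"
    · subst ht
      rw [List.foldl_cons]
      rw [if_pos (rfl : ("END_SECTION" : String) = "END_SECTION")]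
      dsimp only
      rw [IH (out ++ [cur]) [], splitOn_cons_self, hsp]
      simp
    · rw [List.foldl_cons]
      simp only [if_neg ht]
      rw [IH out (cur ++ [t]), splitOn_cons_ne t rest ht, hsp]
      simp

lemma pvSections_eq (tokens : List String) :
    pvSections tokens = tokens.splitOn "END_SECTION" := by
  obtain ⟨h, tl, hsp⟩ := List.exists_cons_of_ne_nil (splitOn_ne_nil tokens)
  have := pvSections_go tokens [] []
  rw [hsp] at this ⊢
  simp only [List.modifyHead, List.nil_append] at this
  simpa [pvSections] using this

-- B equals the closed form at the initial state
lemma alt_eq (tokens : List String) :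
    getTMCharacteristics_alt tokens =
      Fchar 1 "" "" "" "" "" "" "" "" (tokens.splitOn "END_SECTION") := by
  simp only [getTMCharacteristics_alt, pvSections_eq]
  have hsf : ∀ k : Nat, 1 ≤ k →
      secFrom 1 k (tokens.splitOn "END_SECTION") =
        (tokens.splitOn "END_SECTION").getD (k - 1) [] := by
    intro k hk
    unfold secFrom
    rw [if_pos (by exact_mod_cast hk)]
    congr 1
    omega
  simp [Fchar, pvSec, pvLast, hsf 1, hsf 2, hsf 3, hsf 4, hsf 5, hsf 6, hsf 7, hsf 8,
    String.empty_append]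

-- Pre_ provides the initial invariant
lemma okSec_init (tokens : List String) (k : Nat) (hk : 1 ≤ k)
    (hp : ∀ t ∈ ((tokens.splitOn "END_SECTION").getD (k - 1) []).dropLast, t = "") :
    OkSec 1 k "" (tokens.splitOn "END_SECTION") := by
  have hsf : secFrom 1 k (tokens.splitOn "END_SECTION") =
      (tokens.splitOn "END_SECTION").getD (k - 1) [] := by
    unfold secFrom
    rw [if_pos (by exact_mod_cast hk)]
    congr 1
    omega
  constructor
  · intro _ hv; exact absurd rfl hv
  · intro t htm; exact hp t (by rwa [hsf] at htm)

-- ===== VERDICT (by name: the statement is the Claim_ definition above) =====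
theorem getTMCharacteristics_spec : Claim_equal_getTMCharacteristics := by
  intro tokens _hDom hPre
  unfold Spec_getTMCharacteristics
  have hsome := aux_isSome tokens 1 "" "" "" "" "" "" "" ""
    (okSec_init tokens 2 (by norm_num) (hPre 1 (by simp)))
    (okSec_init tokens 3 (by norm_num) (hPre 2 (by simp)))
    (okSec_init tokens 5 (by norm_num) (hPre 4 (by simp)))
    (okSec_init tokens 6 (by norm_num) (hPre 5 (by simp)))
    (okSec_init tokens 7 (by norm_num) (hPre 6 (by simp)))
  obtain ⟨r, hr⟩ := Option.isSome_iff_exists.mp hsome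
  unfold getTMCharacteristics
  rw [hr, Option.getD_some, aux_some tokens 1 _ _ _ _ _ _ _ _ r hr, alt_eq]
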